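-- pv_equiv track=rewrite | github.com/AashikBobade/General | matrix_reverse.py | reverse_col
-- ===== SOURCE A (Python) =====
-- def reverse_col(M):
--     P = []
--     for row in M:
--         L = []
--         for elem in row:
--             L = [elem] + L
--         P.append(L)
--     return P
-- ===== SOURCE B (Python) =====
-- def reverse_col(M):
--     P = []
--     for row in M:
--         r = list(row)
--         i, j = 0, len(r) - 1
--         while i < j:
--             r[i], r[j] = r[j], r[i]
--             i += 1
--             j -= 1
--         P.append(r)
--     return P
-- ===== Notes on version B (the rewrite author's own statement) =====
-- stated objective: faster
-- what changed: B reverses each row in place with a two-pointer swap over a copied list (n/2 swaps), instead of A's rebuilding of the row by prepending every element to a fresh list.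
import Mathlib
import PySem

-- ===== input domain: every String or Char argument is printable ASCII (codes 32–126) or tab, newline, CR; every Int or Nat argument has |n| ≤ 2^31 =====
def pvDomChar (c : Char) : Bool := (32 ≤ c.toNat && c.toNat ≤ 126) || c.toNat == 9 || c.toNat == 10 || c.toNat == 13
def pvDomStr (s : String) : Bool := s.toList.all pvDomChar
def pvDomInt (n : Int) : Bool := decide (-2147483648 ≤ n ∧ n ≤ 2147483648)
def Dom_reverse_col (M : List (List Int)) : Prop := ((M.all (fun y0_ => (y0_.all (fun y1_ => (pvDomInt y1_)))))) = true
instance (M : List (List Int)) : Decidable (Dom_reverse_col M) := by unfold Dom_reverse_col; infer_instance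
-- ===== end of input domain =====

-- B reverses each row with a two-pointer swap on a copied list instead of A's element-by-element prepend; same return value, M is not mutated by either.

-- ===== PORT A =====
-- inner loop: L = [elem] + L over the row
def reverse_col (M : List (List Int)) : List (List Int) :=
  M.foldl (fun P row => P ++ [row.foldl (fun L elem => [elem] ++ L) []]) []

-- ===== PORT B =====
-- while i < j: swap r[i], r[j]; i += 1; j -= 1   (indices always in range in B's use)
def pvSwapLoop (r : List Int) (i j : Nat) : List Int :=
  if _h : i < j then
    pvSwapLoop ((r.set i (r.getD j 0)).set j (r.getD i 0)) (i + 1) (j - 1)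
  else r
termination_by j - i
decreasing_by omega

def reverse_col_alt (M : List (List Int)) : List (List Int) :=
  M.foldl (fun P row => P ++ [pvSwapLoop row 0 (row.length - 1)]) []

-- ===== PRECONDITION & SPEC =====
def Spec_reverse_col (M : List (List Int)) (out : List (List Int)) : Prop := out = reverse_col_alt M
instance (M : List (List Int)) (out : List (List Int)) : Decidable (Spec_reverse_col M out) := by unfold Spec_reverse_col; infer_instance

-- ===== CLAIM (what is proved, stated in full; the proofs are below) =====
def Claim_equal_reverse_col : Prop := ∀ (M : List (List Int)), Dom_reverse_col M → Spec_reverse_col M (reverse_col M)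

-- ===== LEMMAS AND PROOFS =====

-- A's inner loop computes the reverse
theorem foldl_prepend_reverse (row acc : List Int) :
    row.foldl (fun L elem => [elem] ++ L) acc = row.reverse ++ acc := by
  induction row generalizing acc with
  | nil => simp
  | cons x xs ih => simp [List.foldl]

-- B's swap loop, acting on the middle segment m of a ++ m ++ b starting at index a.length,
-- reverses exactly m.
theorem pvSwapLoop_mid (n : Nat) : ∀ (m a b : List Int), m.length = n →
    pvSwapLoop (a ++ m ++ b) a.length (a.length + m.length - 1) = a ++ m.reverse ++ b := by
  induction n using Nat.strong_induction_on with
  | _ n ih =>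
    intro m a b hm
    match m, hm with
    | [], _ => rw [pvSwapLoop]; simp
    | [x], _ => rw [pvSwapLoop]; simp
    | x :: y :: rest, hm =>
      obtain ⟨m', z, h⟩ : ∃ m' z, y :: rest = m' ++ [z] := by
        rcases List.eq_nil_or_concat (y :: rest) with h | ⟨m', z, h⟩
        · simp at h
        · exact ⟨m', z, by simpa [List.concat_eq_append] using h⟩
      rw [h]
      rw [pvSwapLoop]
      have hlen : (x :: (m' ++ [z])).length = m'.length + 2 := by simp
      have hlt : a.length < a.length + (x :: (m' ++ [z])).length - 1 := by
        simp [hlen]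
      rw [dif_pos hlt]
      have hgj : (a ++ (x :: (m' ++ [z])) ++ b).getD (a.length + (x :: (m' ++ [z])).length - 1) 0 = z := by
        have : a ++ (x :: (m' ++ [z])) ++ b = (a ++ x :: m') ++ ([z] ++ b) := by simp
        rw [this]
        have hidx : a.length + (x :: (m' ++ [z])).length - 1 = (a ++ x :: m').length + 0 := by
          simp
        rw [hidx, List.getD, List.getElem?_append_right (by omega)]
        simp
      have hgi : (a ++ (x :: (m' ++ [z])) ++ b).getD a.length 0 = x := by
        rw [List.append_assoc, List.getD, List.getElem?_append_right (by omega)]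
        simp
      rw [hgj, hgi]
      have hset : ((a ++ (x :: (m' ++ [z])) ++ b).set a.length z).set
            (a.length + (x :: (m' ++ [z])).length - 1) x
          = (a ++ [z]) ++ m' ++ ([x] ++ b) := by
        have h1 : (a ++ (x :: (m' ++ [z])) ++ b).set a.length z
            = a ++ (z :: (m' ++ [z])) ++ b := by
          rw [List.append_assoc, List.set_append_right _ _ (le_refl _)]
          simp
        rw [h1]
        have h2 : a ++ (z :: (m' ++ [z])) ++ b = (a ++ z :: m') ++ ([z] ++ b) := by simp
        rw [h2]
        have hidx : a.length + (x :: (m' ++ [z])).length - 1 = (a ++ z :: m').length := by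
          simp
        rw [hidx, List.set_append_right _ _ (le_refl _)]
        simp
      rw [hset]
      have hml : rest.length = m'.length := by
        have := congrArg List.length h
        simpa using this
      have hn : rest.length + 2 = n := by simpa using hm
      have hrec := ih m'.length (by omega) m' (a ++ [z]) ([x] ++ b) rfl
      have hi1 : a.length + 1 = (a ++ [z]).length := by simp
      have hj1 : a.length + (x :: (m' ++ [z])).length - 1 - 1
          = (a ++ [z]).length + m'.length - 1 := by simp
      rw [hi1, hj1, hrec]
      simp

theorem pvSwapLoop_reverse (row : List Int) :
    pvSwapLoop row 0 (row.length - 1) = row.reverse := by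
  have := pvSwapLoop_mid row.length row [] [] rfl
  simpa using this

theorem foldl_append_map {α β : Type} (f : α → β) (M : List α) (acc : List β) :
    M.foldl (fun P row => P ++ [f row]) acc = acc ++ M.map f := by
  induction M generalizing acc with
  | nil => simp
  | cons x xs ih => simp [List.foldl, ih]

-- ===== VERDICT (by name: the statement is the Claim_ definition above) =====
theorem reverse_col_spec : Claim_equal_reverse_col := by
  intro M _
  unfold Spec_reverse_col reverse_col reverse_col_alt
  rw [foldl_append_map, foldl_append_map]
  simp only [List.nil_append]
  congr 1
  funext row
  rw [foldl_prepend_reverse, pvSwapLoop_reverse]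
  simp
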